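-- pv_equiv track=rewrite | github.com/MasterDay3/lab_discrete_2 | main.py | find_cycles_adj_dict
-- ===== SOURCE A (Python) =====
-- def find_cycles_adj_dict(graph, maxlen=10):
--     """
--     finds all the cycles in adjacency dictionary
--     >>> find_cycles_adj_dict({0:[1,2],1:[0,2],2:[0,1]})
--     [[0, 1], [0, 2, 1], [1, 2], [0, 2], [0, 1, 2]]
--     """
--     cycles = set()
--     nodes = sorted(graph.keys())
--
--     def dfs(start, current, visited, path):
--         if len(path) > maxlen :
--             return
--         for nxt in graph.get(current, []):
--             if nxt == start and len(path) >= 2: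
--                 cycle = path[:]
--                 m = min(cycle)
--                 i = cycle.index(m)
--                 cycle = tuple(cycle[i:] + cycle[:i])
--                 cycles.add(cycle)
--             if nxt not in visited and nxt >= start:
--                 visited.add(nxt)
--                 path.append(nxt)
--                 dfs(start, nxt, visited, path)
--                 path.pop()
--                 visited.remove(nxt)
--
--     for start in nodes:
--         dfs(start, start, {start}, [start])
--     return [list(c) for c in cycles]
-- ===== SOURCE B (Python) =====
-- def find_cycles_adj_dict(graph, maxlen=10):
--     """Iterative explicit-stack DFS (same traversal order as the recursive
--     original): each stack entry is an iterator over the current node's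
--     neighbours; path/visited are unwound when a frame is exhausted."""
--     cycles = set()
--     if maxlen >= 1:
--         for start in sorted(graph):
--             path = [start]
--             visited = {start}
--             stack = [iter(graph.get(start, []))]
--             while stack:
--                 nxt = next(stack[-1], None)
--                 if nxt is None:
--                     stack.pop()
--                     visited.discard(path.pop())
--                     continue
--                 if nxt == start and len(path) >= 2:
--                     i = path.index(min(path))
--                     cycles.add(tuple(path[i:] + path[:i]))
--                 if nxt not in visited and nxt >= start and len(path) < maxlen:
--                     visited.add(nxt)
--                     path.append(nxt)
--                     stack.append(iter(graph.get(nxt, [])))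
--     return [list(c) for c in cycles]
-- ===== Notes on version B (the rewrite author's own statement) =====
-- stated objective: alternative
-- what changed: The recursive inner dfs (closure mutating shared path/visited) is replaced by an iterative DFS driven by an explicit stack of neighbour iterators that unwinds path/visited on frame exhaustion, with the depth bound checked before pushing instead of at call entry.
import Mathlib
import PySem

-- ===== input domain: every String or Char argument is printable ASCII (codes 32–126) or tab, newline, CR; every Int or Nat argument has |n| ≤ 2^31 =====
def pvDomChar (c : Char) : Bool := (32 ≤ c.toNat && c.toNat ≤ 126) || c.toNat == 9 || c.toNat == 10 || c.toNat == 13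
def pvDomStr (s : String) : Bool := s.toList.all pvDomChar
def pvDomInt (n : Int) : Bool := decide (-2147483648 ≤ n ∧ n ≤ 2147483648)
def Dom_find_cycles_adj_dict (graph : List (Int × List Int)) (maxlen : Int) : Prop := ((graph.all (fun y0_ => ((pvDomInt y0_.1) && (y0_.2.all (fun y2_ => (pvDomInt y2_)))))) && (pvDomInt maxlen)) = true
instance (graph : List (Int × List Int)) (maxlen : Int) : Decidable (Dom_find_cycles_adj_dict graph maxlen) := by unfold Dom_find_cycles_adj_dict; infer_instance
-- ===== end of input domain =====

-- B replaces the recursive inner dfs by an iterative DFS driven by an explicit stack of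
-- neighbour frames (same traversal and same cycle-insertion order); objective: alternative.
-- Both Pythons iterate their result set (hash order); the ports use insertion order, which
-- the behavioural comparison treats as equal (the return value is compared as a set).

-- ===== PORT A =====
-- shared helper: graph.get(x, [])  (identical code in Source A and Source B)
def pvAdj (graph : List (Int × List Int)) (x : Int) : List Int :=
  PySem.Dict.getD (PySem.Dict.mk graph) x []

-- shared helper: min/index/rotate canonicalisation (identical code in Source A and Source B);
-- the `none` branches are unreachable (path is never empty)
def pvCanon (p : List Int) : List Int :=
  match PySem.List.min? p (fun x => x) with
  | none => []
  | some m =>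
    match PySem.List.index? p m with
    | none => []
    | some i => PySem.List.slice p (some (i : Int)) none ++ PySem.List.slice p none (some (i : Int))

-- A's recursive dfs; `fuel` only makes the recursion total: it starts at maxlen.toNat + 1
-- and can reach 0 only when len(path) > maxlen, where the Python has already returned.
mutual
def pvDfsA (graph : List (Int × List Int)) (maxlen start : Int) (fuel : Nat) (current : Int)
    (visited : PySem.Set Int) (path : List Int) (cycles : PySem.Set (List Int)) :
    PySem.Set (List Int) :=
  if maxlen < (path.length : Int) then cycles
  else
    match fuel with
    | 0 => cycles
    | f + 1 => pvLoopA graph maxlen start f (pvAdj graph current) visited path cycles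
termination_by (fuel, 0)

def pvLoopA (graph : List (Int × List Int)) (maxlen start : Int) (f : Nat) (nbrs : List Int)
    (visited : PySem.Set Int) (path : List Int) (cycles : PySem.Set (List Int)) :
    PySem.Set (List Int) :=
  match nbrs with
  | [] => cycles
  | nxt :: ns =>
    let c1 := if nxt = start ∧ 2 ≤ path.length then PySem.Set.add cycles (pvCanon path) else cycles
    let c2 := if visited.contains nxt = false ∧ start ≤ nxt then
        pvDfsA graph maxlen start f nxt (visited.add nxt) (path ++ [nxt]) c1
      else c1
    pvLoopA graph maxlen start f ns visited path c2
termination_by (f, nbrs.length + 1)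
end

def find_cycles_adj_dict (graph : List (Int × List Int)) (maxlen : Int) : List (List Int) :=
  let nodes := PySem.List.sorted (PySem.Dict.keys (PySem.Dict.mk graph)) (fun x => x) false
  nodes.foldl
    (fun cycles start =>
      pvDfsA graph maxlen start (maxlen.toNat + 1) start (PySem.Set.ofList [start]) [start] cycles)
    PySem.Set.empty

-- ===== PORT B =====
-- termination measure for the stack loop: Σ (|frame| + 1) * K^(depth budget)
def pvKB (graph : List (Int × List Int)) : Nat := (graph.map (fun p => p.2.length)).sum + 2

def pvMu (K : Nat) : Nat → List (List Int) → Nat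
  | _, [] => 0
  | c, f :: rest => (f.length + 1) * K ^ c + pvMu K (c + 1) rest

lemma pvMu_mono (K : Nat) (hK : 1 ≤ K) : ∀ (s : List (List Int)) {c c' : Nat}, c ≤ c' →
    pvMu K c s ≤ pvMu K c' s := by
  intro s
  induction s with
  | nil => intro c c' _; simp [pvMu]
  | cons f rest ih =>
    intro c c' h
    simp only [pvMu]
    exact Nat.add_le_add
      (Nat.mul_le_mul_left _ (Nat.pow_le_pow_right hK h))
      (ih (Nat.add_le_add_right h 1))

lemma pvMu_pop (K : Nat) (hK : 1 ≤ K) (rest : List (List Int)) {c c' : Nat} (h : c' ≤ c + 1) :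
    pvMu K c' rest < pvMu K c ([] :: rest) := by
  have h1 : pvMu K c' rest ≤ pvMu K (c + 1) rest := pvMu_mono K hK rest h
  have h2 : 0 < K ^ c := Nat.pow_pos (by omega)
  simp only [pvMu, List.length_nil]
  calc pvMu K c' rest ≤ pvMu K (c + 1) rest := h1
    _ < K ^ c + pvMu K (c + 1) rest := Nat.lt_add_of_pos_left h2
    _ = (0 + 1) * K ^ c + pvMu K (c + 1) rest := by ring

lemma pvMu_skip (K : Nat) (hK : 1 ≤ K) (rest : List (List Int)) (nxt : Int) (ns : List Int)
    (c : Nat) : pvMu K c (ns :: rest) < pvMu K c ((nxt :: ns) :: rest) := by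
  have h2 : 0 < K ^ c := Nat.pow_pos (by omega)
  simp only [pvMu, List.length_cons]
  exact Nat.add_lt_add_right ((Nat.mul_lt_mul_right h2).mpr (by omega)) _

lemma pvMu_push (K : Nat) (a ns : List Int) (nxt : Int) (rest : List (List Int)) {c : Nat}
    (hadj : a.length + 2 ≤ K) (hc : 1 ≤ c) :
    pvMu K (c - 1) (a :: ns :: rest) < pvMu K c ((nxt :: ns) :: rest) := by
  obtain ⟨d, rfl⟩ : ∃ d, c = d + 1 := ⟨c - 1, by omega⟩
  simp only [pvMu, List.length_cons, Nat.add_sub_cancel]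
  have hpow : 0 < K ^ d := Nat.pow_pos (by omega)
  have key : (a.length + 1) * K ^ d < K ^ (d + 1) := by
    rw [pow_succ, Nat.mul_comm (K ^ d) K]
    exact (Nat.mul_lt_mul_right hpow).mpr (by omega)
  calc (a.length + 1) * K ^ d + ((ns.length + 1) * K ^ (d + 1) + pvMu K (d + 1 + 1) rest)
      = (ns.length + 1) * K ^ (d + 1)
        + ((a.length + 1) * K ^ d + pvMu K (d + 1 + 1) rest) := by ring
    _ < (ns.length + 1) * K ^ (d + 1) + (K ^ (d + 1) + pvMu K (d + 1 + 1) rest) :=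
        Nat.add_lt_add_left (Nat.add_lt_add_right key _) _
    _ = (ns.length + 1 + 1) * K ^ (d + 1) + pvMu K (d + 1 + 1) rest := by ring

lemma pvAdj_len (graph : List (Int × List Int)) (x : Int) :
    (pvAdj graph x).length + 2 ≤ pvKB graph := by
  have h : ∀ (l : List (Int × List Int)),
      ((PySem.Dict.mk l).getD x []).length ≤ (l.map (fun p => p.2.length)).sum := by
    intro l
    induction l with
    | nil => simp [PySem.Dict.getD, PySem.Dict.get?]
    | cons p rest ih =>
      rw [PySem.Dict.getD_eq_get?_getD] at ih ⊢
      rw [PySem.Dict.get?_mk_cons]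
      by_cases hp : (p.1 == x) = true
      · simp only [hp, if_true, Option.getD_some, List.map_cons, List.sum_cons]
        omega
      · simp only [hp, Bool.false_eq_true, if_false, List.map_cons, List.sum_cons]
        omega
  have := h graph
  simp only [pvAdj, pvKB]
  omega

-- B's iterative DFS: an explicit stack of remaining-neighbour frames (top first);
-- path/visited are unwound when a frame is exhausted, exactly as Source B's while loop does.
def pvLoopB (graph : List (Int × List Int)) (maxlen start : Int)
    (stack : List (List Int)) (path : List Int) (visited : PySem.Set Int)
    (cycles : PySem.Set (List Int)) : PySem.Set (List Int) :=
  match stack with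
  | [] => cycles
  | [] :: rest =>
    pvLoopB graph maxlen start rest path.dropLast (visited.discard (path.getLastD 0)) cycles
  | (nxt :: ns) :: rest =>
    let c1 := if nxt = start ∧ 2 ≤ path.length then PySem.Set.add cycles (pvCanon path) else cycles
    if visited.contains nxt = false ∧ start ≤ nxt ∧ (path.length : Int) < maxlen then
      pvLoopB graph maxlen start (pvAdj graph nxt :: ns :: rest) (path ++ [nxt]) (visited.add nxt) c1
    else
      pvLoopB graph maxlen start (ns :: rest) path visited c1
termination_by pvMu (pvKB graph) ((maxlen + 1 - path.length).toNat) stack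
decreasing_by
  · apply pvMu_pop _ (by simp [pvKB]) _ (by simp [List.length_dropLast]; omega)
  · have hlen : ((path ++ [nxt]).length : Int) = (path.length : Int) + 1 := by
      simp
    have hc : 1 ≤ (maxlen + 1 - (path.length : Int)).toNat := by omega
    have heq : (maxlen + 1 - ((path ++ [nxt]).length : Int)).toNat
        = (maxlen + 1 - (path.length : Int)).toNat - 1 := by
      rw [hlen]; omega
    rw [heq]
    exact pvMu_push _ _ _ _ _ (pvAdj_len graph nxt) hc
  · apply pvMu_skip _ (by simp [pvKB])

def find_cycles_adj_dict_alt (graph : List (Int × List Int)) (maxlen : Int) : List (List Int) :=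
  if 1 ≤ maxlen then
    (PySem.List.sorted (PySem.Dict.keys (PySem.Dict.mk graph)) (fun x => x) false).foldl
      (fun cycles start =>
        pvLoopB graph maxlen start [pvAdj graph start] [start] (PySem.Set.ofList [start]) cycles)
      PySem.Set.empty
  else PySem.Set.empty

-- ===== PRECONDITION & SPEC =====
def Spec_find_cycles_adj_dict (graph : List (Int × List Int)) (maxlen : Int) (out : List (List Int)) : Prop := out = find_cycles_adj_dict_alt graph maxlen
instance (graph : List (Int × List Int)) (maxlen : Int) (out : List (List Int)) : Decidable (Spec_find_cycles_adj_dict graph maxlen out) := by unfold Spec_find_cycles_adj_dict; infer_instance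

-- ===== CLAIM (what is proved, stated in full; the proofs are below) =====
def Claim_equal_find_cycles_adj_dict : Prop := ∀ (graph : List (Int × List Int)) (maxlen : Int), Dom_find_cycles_adj_dict graph maxlen → Spec_find_cycles_adj_dict graph maxlen (find_cycles_adj_dict graph maxlen)

-- ===== LEMMAS AND PROOFS =====

lemma pvDiscardAdd (s : PySem.Set Int) (x : Int) (h : s.contains x = false) :
    (s.add x).discard x = s := by
  have hx : x ∉ s := by simpa using h
  simp only [PySem.Set.add, h, Bool.false_eq_true, if_false, PySem.Set.discard]
  rw [List.filter_append]
  have h1 : List.filter (fun y => !y == x) s = s := by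
    apply List.filter_eq_self.mpr
    intro a ha
    have : a ≠ x := fun hh => hx (hh ▸ ha)
    simp [this]
  have h2 : List.filter (fun y => !y == x) [x] = [] := by simp
  rw [h1, h2, List.append_nil]

-- unfolding helpers for A's dfs
lemma pvDfsA_stop (graph : List (Int × List Int)) (maxlen start : Int) (fuel : Nat)
    (current : Int) (visited : PySem.Set Int) (path : List Int) (cycles : PySem.Set (List Int))
    (h : maxlen < (path.length : Int)) :
    pvDfsA graph maxlen start fuel current visited path cycles = cycles := by
  rw [pvDfsA.eq_def]; simp [h]

lemma pvDfsA_succ (graph : List (Int × List Int)) (maxlen start : Int) (g : Nat)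
    (current : Int) (visited : PySem.Set Int) (path : List Int) (cycles : PySem.Set (List Int))
    (h : ¬ maxlen < (path.length : Int)) :
    pvDfsA graph maxlen start (g + 1) current visited path cycles
      = pvLoopA graph maxlen start g (pvAdj graph current) visited path cycles := by
  rw [pvDfsA.eq_def]; simp [h]

-- the simulation: running B's loop on the top frame equals A's inner loop, then popping
lemma pvSim (graph : List (Int × List Int)) (maxlen start : Int) :
    ∀ (f : Nat) (nbrs path : List Int) (visited : PySem.Set Int)
      (cycles : PySem.Set (List Int)) (rest : List (List Int)),
      1 ≤ path.length → (path.length : Int) ≤ maxlen → path.length + f = maxlen.toNat + 1 →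
      pvLoopB graph maxlen start (nbrs :: rest) path visited cycles
        = pvLoopB graph maxlen start rest path.dropLast (visited.discard (path.getLastD 0))
            (pvLoopA graph maxlen start f nbrs visited path cycles) := by
  intro f
  induction f with
  | zero =>
    intro nbrs path visited cycles rest h1 h2 h3
    exfalso; omega
  | succ g ihf =>
    intro nbrs
    induction nbrs with
    | nil =>
      intro path visited cycles rest _ _ _
      simp only [pvLoopA, pvLoopB]
    | cons nxt ns ihn =>
      intro path visited cycles rest h1 h2 h3
      simp only [pvLoopA, pvLoopB]
      by_cases hvs : visited.contains nxt = false ∧ start ≤ nxt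
      · by_cases hlen : (path.length : Int) < maxlen
        · rw [if_pos (⟨hvs.1, hvs.2, hlen⟩ : _ ∧ _ ∧ _), if_pos hvs]
          rw [pvDfsA_succ _ _ _ _ _ _ _ _ (by simp; omega)]
          rw [ihf (pvAdj graph nxt) (path ++ [nxt]) (visited.add nxt) _ (ns :: rest)
            (by simp) (by simp; omega) (by simp; omega)]
          rw [List.dropLast_concat, List.getLastD_concat, pvDiscardAdd visited nxt hvs.1]
          exact ihn path visited _ rest h1 h2 h3
        · rw [if_neg (fun hc => hlen hc.2.2), if_pos hvs]
          rw [pvDfsA_stop _ _ _ _ _ _ _ _ (by simp; omega)]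
          exact ihn path visited _ rest h1 h2 h3
      · rw [if_neg (fun hc => hvs ⟨hc.1, hc.2.1⟩), if_neg hvs]
        exact ihn path visited _ rest h1 h2 h3

-- one start node: B's stack loop equals A's dfs call
lemma pvStep (graph : List (Int × List Int)) (maxlen start : Int)
    (cycles : PySem.Set (List Int)) (hm : 1 ≤ maxlen) :
    pvLoopB graph maxlen start [pvAdj graph start] [start] (PySem.Set.ofList [start]) cycles
      = pvDfsA graph maxlen start (maxlen.toNat + 1) start (PySem.Set.ofList [start]) [start] cycles := by
  rw [pvDfsA_succ _ _ _ _ _ _ _ _ (by simp; omega)]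
  rw [pvSim graph maxlen start maxlen.toNat (pvAdj graph start) [start] _ cycles []
    (by simp) (by simpa using hm) (by simp; omega)]
  simp only [pvLoopB]

lemma pvTop (graph : List (Int × List Int)) (maxlen : Int) :
    find_cycles_adj_dict graph maxlen = find_cycles_adj_dict_alt graph maxlen := by
  unfold find_cycles_adj_dict find_cycles_adj_dict_alt
  by_cases hm : 1 ≤ maxlen
  · rw [if_pos hm]
    suffices h : ∀ (ns : List Int) (acc : PySem.Set (List Int)),
        ns.foldl (fun cycles start =>
            pvDfsA graph maxlen start (maxlen.toNat + 1) start (PySem.Set.ofList [start]) [start] cycles) acc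
          = ns.foldl (fun cycles start =>
            pvLoopB graph maxlen start [pvAdj graph start] [start] (PySem.Set.ofList [start]) cycles) acc by
      exact h _ _
    intro ns
    induction ns with
    | nil => intro acc; rfl
    | cons s t ih =>
      intro acc
      simp only [List.foldl_cons]
      rw [pvStep graph maxlen s acc hm]
      exact ih _
  · rw [if_neg hm]
    suffices h : ∀ (ns : List Int) (acc : PySem.Set (List Int)),
        ns.foldl (fun cycles start =>
            pvDfsA graph maxlen start (maxlen.toNat + 1) start (PySem.Set.ofList [start]) [start] cycles) acc
          = acc by
      exact h _ _
    intro ns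
    induction ns with
    | nil => intro acc; rfl
    | cons s t ih =>
      intro acc
      simp only [List.foldl_cons]
      rw [pvDfsA_stop _ _ _ _ _ _ _ _ (by simp; omega)]
      exact ih _

-- ===== VERDICT (by name: the statement is the Claim_ definition above) =====
theorem find_cycles_adj_dict_spec : Claim_equal_find_cycles_adj_dict := by
  intro graph maxlen _
  unfold Spec_find_cycles_adj_dict
  exact pvTop graph maxlen
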